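-- pv_equiv track=rewrite | github.com/YijunZhou99/Python-project | project 4/game_logic original version.py | gravity
-- ===== SOURCE A (Python) =====
-- NONE=' '*3
--
-- def gravity(field:list):
--     '''
--     This funciton takes a field,
--     returns a field with all jewels immediately fill empty space below them.
--     '''
--     new_field=[]
--     for i in range(len(field)):
--         line=[]
--         number=0
--         for j in range(len(field[0])):
--             if field[i][j]!=NONE:
--                 line.append(field[i][j])
--             elif field[i][j]==NONE:
--                 number+=1
--         for n in range(number):
--             line.insert(0,NONE)
--         new_field.append(line)
--     return new_field
-- ===== SOURCE B (Python) =====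
-- NONE = ' ' * 3
--
--
-- def gravity(field: list):
--     # The grid is w = len(field[0]) columns wide; per row, stable-sort those
--     # cells with key "is not empty": empties first, jewels keep their order.
--     w = len(field[0]) if field else 0
--     return [sorted(row[:w], key=lambda c: c != NONE) for row in field]
-- ===== Notes on version B (the rewrite author's own statement) =====
-- stated objective: idiomatic
-- what changed: Replaces A's per-row count-empties-and-prepend partition with a single stable sort of each row's w grid cells keyed by 'cell is not empty', which puts empty cells first and keeps jewels in order.
import Mathlib
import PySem

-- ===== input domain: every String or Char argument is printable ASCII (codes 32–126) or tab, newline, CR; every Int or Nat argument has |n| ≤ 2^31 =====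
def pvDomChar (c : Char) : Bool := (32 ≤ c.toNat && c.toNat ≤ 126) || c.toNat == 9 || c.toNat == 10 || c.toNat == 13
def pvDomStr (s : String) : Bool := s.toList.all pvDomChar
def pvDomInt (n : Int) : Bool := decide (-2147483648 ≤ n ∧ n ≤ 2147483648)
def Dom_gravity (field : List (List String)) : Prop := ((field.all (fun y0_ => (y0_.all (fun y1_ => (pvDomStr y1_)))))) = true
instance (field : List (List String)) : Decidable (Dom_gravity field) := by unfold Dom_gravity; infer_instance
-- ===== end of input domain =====

-- B replaces A's count-empties-and-prepend partition with a stable per-row sort keyed by "cell is not empty" (idiomatic; same result on rectangular grids).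


def pvNONE : String := "   "

-- ===== PORT A =====
-- literal transliteration: outer loop over i ∈ range(len(field)), inner over j ∈ range(len(field[0])),
-- then 'for n in range(number): line.insert(0, NONE)' (insert at index 0 = cons).
-- field[i] / field[i][j] are ported with pyGetD: inside Pre_gravity every access is in range.
def stepA (st : List String × Int) (cell : String) : List String × Int :=
  if cell != pvNONE then (st.1 ++ [cell], st.2)
  else if cell == pvNONE then (st.1, st.2 + 1) else st

-- body of the outer loop: build 'line' for row i (w = len(field[0]))
def rowA (w : Nat) (row : List String) : List String :=
  let st := (PySem.List.pyRange 0 (w : Int) 1).foldl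
    (fun (st : List String × Int) j => stepA st (PySem.List.pyGetD row j "")) ([], 0)
  (PySem.List.pyRange 0 st.2 1).foldl (fun l _ => pvNONE :: l) st.1

def gravity (field : List (List String)) : List (List String) :=
  (PySem.List.pyRange 0 (field.length : Int) 1).foldl (fun new_field i =>
    new_field ++ [rowA (field.headD []).length (PySem.List.pyGetD field i [])]) []

-- ===== PORT B =====
-- Source B: w = len(field[0]) if field else 0; [sorted(row[:w], key=lambda c: c != NONE) for row in field]
-- (stable sort, False < True; row[:w] is PySem.List.slice)
def gravity_alt (field : List (List String)) : List (List String) :=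
  let w : Nat := (field.headD []).length
  field.map (fun row =>
    PySem.List.sorted (PySem.List.slice row none (some (w : Int))) (fun c => c != pvNONE) false)

-- ===== PRECONDITION & SPEC =====
-- Pre_ excludes exactly the grids with a row shorter than row 0: there A raises IndexError.
def Pre_gravity (field : List (List String)) : Prop :=
  ∀ r ∈ field, (field.headD []).length ≤ r.length
instance (field : List (List String)) : Decidable (Pre_gravity field) := by
  unfold Pre_gravity; infer_instance
def pvWitness_gravity : List (List String) := [["   ", "ab"], ["cd", "   "]]

def Spec_gravity (field : List (List String)) (out : List (List String)) : Prop := out = gravity_alt field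
instance (field : List (List String)) (out : List (List String)) : Decidable (Spec_gravity field out) := by unfold Spec_gravity; infer_instance

-- ===== CLAIM (what is proved, stated in full; the proofs are below) =====
def Claim_equal_gravity : Prop := ∀ (field : List (List String)), Dom_gravity field → Pre_gravity field → Spec_gravity field (gravity field)

-- ===== LEMMAS AND PROOFS =====

-- insertion of an empty cell goes right after the existing empty cells (stability)
theorem insertBy_empty (c : String) (hc : (c != pvNONE) = false)
    (A B : List String) (hA : ∀ y ∈ A, (y != pvNONE) = false)
    (hB : ∀ y ∈ B, (y != pvNONE) = true) :
    PySem.List.insertBy (fun a b => decide ((a != pvNONE) < (b != pvNONE))) c (A ++ B)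
      = A ++ c :: B := by
  induction A with
  | nil =>
    cases B with
    | nil => simp [PySem.List.insertBy]
    | cons b bs =>
      have hb := hB b (by simp)
      simp [PySem.List.insertBy, hc, hb]
  | cons a as ih =>
    have ha := hA a (by simp)
    simp only [List.cons_append, PySem.List.insertBy, hc, ha]
    simp only [decide_eq_true_eq]
    rw [if_neg (by simp)]
    simp [ih (fun y hy => hA y (by simp [hy]))]

-- insertion of a jewel goes at the very end
theorem insertBy_jewel (c : String) (hc : (c != pvNONE) = true) (l : List String) :
    PySem.List.insertBy (fun a b => decide ((a != pvNONE) < (b != pvNONE))) c l = l ++ [c] := by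
  induction l with
  | nil => simp [PySem.List.insertBy]
  | cons y ys ih =>
    have : decide ((c != pvNONE) < (y != pvNONE)) = false := by
      cases h : (y != pvNONE) <;> simp [hc]
    simp [PySem.List.insertBy, this, ih]

theorem foldl_insertBy_partition (r : List String) :
    ∀ (A B : List String), (∀ y ∈ A, (y != pvNONE) = false) → (∀ y ∈ B, (y != pvNONE) = true) →
    r.foldl (fun acc x =>
        PySem.List.insertBy (fun a b => decide ((a != pvNONE) < (b != pvNONE))) x acc) (A ++ B)
      = (A ++ r.filter (fun y => y == pvNONE)) ++ (B ++ r.filter (fun y => y != pvNONE)) := by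
  induction r with
  | nil => intro A B _ _; simp
  | cons c cs ih =>
    intro A B hA hB
    by_cases hc : (c != pvNONE) = true
    · have h1 : (c == pvNONE) = false := by
        cases h : (c == pvNONE) <;> simp_all [bne]
      have hB' : ∀ y ∈ B ++ [c], (y != pvNONE) = true := by
        intro y hy
        rcases List.mem_append.1 hy with h | h
        · exact hB y h
        · simp at h; simpa [h] using hc
      rw [List.foldl_cons, insertBy_jewel c hc, List.append_assoc, ih A (B ++ [c]) hA hB']
      simp [hc, h1]
    · have hc' : (c != pvNONE) = false := by simpa using hc
      have h1 : (c == pvNONE) = true := by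
        cases h : (c == pvNONE) <;> simp_all [bne]
      have hA' : ∀ y ∈ A ++ [c], (y != pvNONE) = false := by
        intro y hy
        rcases List.mem_append.1 hy with h | h
        · exact hA y h
        · simp at h; simpa [h] using hc'
      rw [List.foldl_cons, insertBy_empty c hc' A B hA hB,
        show A ++ c :: B = (A ++ [c]) ++ B by simp, ih (A ++ [c]) B hA' hB]
      simp [hc', h1]

-- B's sorted row is: empty cells (in order) then jewels (in order)
theorem sorted_row (r : List String) :
    PySem.List.sorted r (fun c => c != pvNONE) false
      = r.filter (fun y => y == pvNONE) ++ r.filter (fun y => y != pvNONE) := by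
  rw [PySem.List.sorted_eq_foldl_insertBy]
  simpa using foldl_insertBy_partition r [] [] (by simp) (by simp)

-- the empty cells of a row are count-many copies of pvNONE
theorem filter_eq_replicate (r : List String) :
    r.filter (fun y => y == pvNONE)
      = List.replicate (r.countP (fun y => y == pvNONE)) pvNONE := by
  induction r with
  | nil => simp
  | cons c cs ih =>
    by_cases h : (c == pvNONE) = true
    · have : c = pvNONE := by simpa using h
      simp [this, ih, List.replicate_succ]
    · simp [h, ih]

-- A's inner j-loop, seen over the row itself
theorem inner_fold (r : List String) : ∀ (l : List String) (n : Int),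
    r.foldl stepA (l, n)
      = (l ++ r.filter (fun y => y != pvNONE), n + (r.countP (fun y => y == pvNONE) : Int)) := by
  induction r with
  | nil => intro l n; simp
  | cons c cs ih =>
    intro l n
    by_cases h : (c != pvNONE) = true
    · have hcp : c ≠ pvNONE := by simpa using h
      have hstep : stepA (l, n) c = (l ++ [c], n) := by simp [stepA, hcp]
      rw [List.foldl_cons, hstep, ih]
      simp [hcp]
    · have hcp : c = pvNONE := by simpa using h
      have hstep : stepA (l, n) c = (l, n + 1) := by simp [stepA, hcp]
      rw [List.foldl_cons, hstep, ih]
      simp [hcp]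
      ring

-- A's prepend loop: n copies of pvNONE in front
theorem prepend_fold (n : Nat) (l : List String) :
    (PySem.List.pyRange 0 (n : Int) 1).foldl (fun l _ => pvNONE :: l) l
      = List.replicate n pvNONE ++ l := by
  induction n with
  | zero => simp [PySem.List.pyRange_one_eq_nil]
  | succ k ih =>
    rw [show ((k + 1 : Nat) : Int) = (k : Int) + 1 by push_cast; ring]
    rw [PySem.List.pyRange_one_append 0 (k : Int) ((k : Int) + 1) (by positivity) (by omega),
      List.foldl_append, ih,
      show PySem.List.pyRange (k : Int) ((k : Int) + 1) 1 = [(k : Int)] by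
        rw [PySem.List.pyRange_one_cons (by omega), PySem.List.pyRange_one_eq_nil (by omega)]]
    simp only [List.foldl_cons, List.foldl_nil]
    rw [← List.cons_append, ← List.replicate_succ]

-- one row of A equals one row of B (for a row of the stated width)
theorem foldl_congr_all {A B : Type} (l : List A) (f g : B → A → B) :
    ∀ (b : B), (∀ x ∈ l, ∀ acc, f acc x = g acc x) → l.foldl f b = l.foldl g b := by
  induction l with
  | nil => intro b _; rfl
  | cons x xs ih =>
    intro b h
    rw [List.foldl_cons, List.foldl_cons, h x (by simp) b,
      ih (g b x) (fun y hy acc => h y (by simp [hy]) acc)]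

theorem row_eq (w : Nat) (row : List String) (hrow : w ≤ row.length) :
    rowA w row = PySem.List.sorted (row.take w) (fun c => c != pvNONE) false := by
  unfold rowA
  have htake : (row.take w).length = w := by simp [List.length_take, hrow]
  have hcongr : ∀ (st : List String × Int) (j : Int), j ∈ PySem.List.pyRange 0 (w : Int) 1 →
      stepA st (PySem.List.pyGetD row j "") = stepA st (PySem.List.pyGetD (row.take w) j "") := by
    intro st j hj
    obtain ⟨h0, hw⟩ := (PySem.List.mem_pyRange_one).1 hj
    obtain ⟨n, rfl⟩ : ∃ n : Nat, j = (n : Int) := ⟨j.toNat, (Int.toNat_of_nonneg h0).symm⟩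
    have hn : n < w := by exact_mod_cast hw
    rw [PySem.List.pyGetD_natCast, PySem.List.pyGetD_natCast]
    have : (row.take w).getD n "" = row.getD n "" := by
      simp [List.getD, hn]
    rw [this]
  rw [foldl_congr_all (PySem.List.pyRange 0 (w : Int) 1)
    (fun (st : List String × Int) j => stepA st (PySem.List.pyGetD row j ""))
    (fun (st : List String × Int) j => stepA st (PySem.List.pyGetD (row.take w) j ""))
    ([], 0) (fun j hj st => hcongr st j hj)]
  rw [show ((w : Nat) : Int) = ((row.take w).length : Int) by exact_mod_cast htake.symm]
  rw [PySem.List.foldl_pyRange_zero_pyGetD' (row.take w) "" stepA ([], 0)]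
  rw [inner_fold (row.take w) [] 0]
  simp only [List.nil_append, Int.zero_add]
  rw [prepend_fold]
  rw [sorted_row, filter_eq_replicate]

-- A's outer loop over equal-width rows builds exactly B's per-row sorted rows
theorem foldl_rowA (w : Nat) : ∀ (rows : List (List String)) (acc : List (List String)),
    (∀ r ∈ rows, w ≤ r.length) →
    rows.foldl (fun nf row => nf ++ [rowA w row]) acc
      = acc ++ rows.map (fun row => PySem.List.sorted (row.take w) (fun c => c != pvNONE) false) := by
  intro rows
  induction rows with
  | nil => intro acc _; simp
  | cons f fs ih =>
    intro acc h
    rw [List.foldl_cons, row_eq w f (h f (by simp)), List.map_cons,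
      ih (acc ++ [PySem.List.sorted (f.take w) (fun c => c != pvNONE) false])
        (fun r hr => h r (by simp [hr]))]
    simp

-- ===== VERDICT (by name: the statement is the Claim_ definition above) =====
theorem gravity_spec : Claim_equal_gravity := by
  intro field _ hpre
  unfold Spec_gravity gravity gravity_alt
  rw [PySem.List.foldl_pyRange_zero_pyGetD' field ([] : List String)
    (fun (new_field : List (List String)) row =>
      new_field ++ [rowA (field.headD []).length row]) ([] : List (List String))]
  rw [foldl_rowA (field.headD []).length field [] hpre]
  simp [PySem.List.slice_to_natCast]
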